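-- pv_equiv track=rewrite | github.com/jhenriqueb/DOT-366-2025-1 | ATIVIDADE 04/10.py | maior_soma_repetidos
-- ===== SOURCE A (Python) =====
-- def maior_soma_repetidos(lista):
--     contagem = {}
--     for numero in lista:
--         contagem[numero] = contagem.get(numero, 0) + 1
--
--     maior_soma = 0
--     for numero, quantidade in contagem.items():
--         if quantidade > 1:
--             soma = numero * quantidade
--             if soma > maior_soma:
--                 maior_soma = soma
--
--     return maior_soma
-- ===== SOURCE B (Python) =====
-- def maior_soma_repetidos(lista):
--     ordenada = sorted(lista)
--     if not ordenada:
--         return 0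
--     best = 0
--     cur = ordenada[0]
--     run = 1
--     for x in ordenada[1:]:
--         if x == cur:
--             run += 1
--         else:
--             if run > 1:
--                 if cur * run > best:
--                     best = cur * run
--             cur = x
--             run = 1
--     if run > 1:
--         if cur * run > best:
--             best = cur * run
--     return best
-- ===== Notes on version B (the rewrite author's own statement) =====
-- stated objective: alternative
-- what changed: Replaces the hash-count dictionary plus a second pass over its items by sorting a copy of the list and scanning runs of consecutive equal values in one pass, updating the running maximum at each run boundary.
import Mathlib
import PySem

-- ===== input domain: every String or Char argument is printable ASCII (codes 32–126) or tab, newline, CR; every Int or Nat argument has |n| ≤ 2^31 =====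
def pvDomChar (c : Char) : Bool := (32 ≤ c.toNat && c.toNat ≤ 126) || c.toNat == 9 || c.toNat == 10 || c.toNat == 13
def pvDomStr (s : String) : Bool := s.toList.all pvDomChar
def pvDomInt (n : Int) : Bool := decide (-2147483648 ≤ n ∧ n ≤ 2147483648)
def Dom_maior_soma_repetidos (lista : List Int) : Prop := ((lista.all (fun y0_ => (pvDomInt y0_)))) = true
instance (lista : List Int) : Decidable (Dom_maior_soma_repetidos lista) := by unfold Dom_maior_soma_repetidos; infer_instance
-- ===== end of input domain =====

-- B replaces A's hash-count dictionary by sort-then-run-scan (alternative algorithm, similar cost).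


-- ===== PORT A =====
def maior_soma_repetidos (lista : List Int) : Int :=
  let contagem := lista.foldl (fun d numero => d.insert numero (d.getD numero 0 + 1)) PySem.Dict.empty
  contagem.items.foldl
    (fun maior_soma p =>
      if p.2 > 1 then
        let soma := p.1 * p.2
        if soma > maior_soma then soma else maior_soma
      else maior_soma) 0

-- ===== PORT B =====
-- run scan over the tail of the sorted list: cur = current value, run = its run length so far
def runScan (best cur run : Int) : List Int → Int
  | [] => if run > 1 then (if cur * run > best then cur * run else best) else best
  | x :: xs =>
      if x == cur then runScan best cur (run + 1) xs
      else runScan (if run > 1 then (if cur * run > best then cur * run else best) else best) x 1 xs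

def maior_soma_repetidos_alt (lista : List Int) : Int :=
  match PySem.List.sorted lista (fun x => x) false with
  | [] => 0
  | x :: xs => runScan 0 x 1 xs

-- ===== PRECONDITION & SPEC =====
def Spec_maior_soma_repetidos (lista : List Int) (out : Int) : Prop := out = maior_soma_repetidos_alt lista
instance (lista : List Int) (out : Int) : Decidable (Spec_maior_soma_repetidos lista out) := by unfold Spec_maior_soma_repetidos; infer_instance

-- ===== CLAIM (what is proved, stated in full; the proofs are below) =====
def Claim_equal_maior_soma_repetidos : Prop := ∀ (lista : List Int), Dom_maior_soma_repetidos lista → Spec_maior_soma_repetidos lista (maior_soma_repetidos lista)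

-- ===== LEMMAS AND PROOFS =====

-- the common fold step: "if q > 1 and v*q > best: best = v*q"
def stepF (m : Int) (p : Int × Int) : Int :=
  if p.2 > 1 then (if p.1 * p.2 > m then p.1 * p.2 else m) else m

theorem stepF_comm (z : Int) (x y : Int × Int) : stepF (stepF z x) y = stepF (stepF z y) x := by
  simp only [stepF]
  generalize x.1 * x.2 = a
  generalize y.1 * y.2 = b
  split_ifs <;> omega

-- the runs of (cur, run-so-far) followed by a list, as (value, run length) pairs
def runsAux (cur run : Int) : List Int → List (Int × Int)
  | [] => [(cur, run)]
  | x :: xs => if x = cur then runsAux cur (run + 1) xs else (cur, run) :: runsAux x 1 xs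

theorem runScan_eq_foldl (s : List Int) : ∀ best cur run,
    runScan best cur run s = (runsAux cur run s).foldl stepF best := by
  induction s with
  | nil => intro best cur run; rfl
  | cons x xs ih =>
      intro best cur run
      simp only [runScan, runsAux]
      by_cases h : x = cur
      · simp [h, ih]
      · simp [h, ih, stepF]

theorem mem_runsAux (s : List Int) : ∀ cur run, (cur :: s).Pairwise (· ≤ ·) →
    ∀ v r : Int, (v, r) ∈ runsAux cur run s ↔
      (v = cur ∧ r = run + (s.count cur : Int)) ∨ (v ∈ s ∧ v ≠ cur ∧ r = (s.count v : Int)) := by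
  induction s with
  | nil => intro cur run _ v r; simp [runsAux]
  | cons y ys ih =>
      intro cur run hp v r
      have hcy : cur ≤ y := (List.pairwise_cons.1 hp).1 y (List.mem_cons_self ..)
      have hys : (y :: ys).Pairwise (· ≤ ·) := (List.pairwise_cons.1 hp).2
      simp only [runsAux]
      by_cases h : y = cur
      · subst h
        rw [if_pos rfl, ih y (run + 1) hys v r]
        have hcself : ((y :: ys).count y : Int) = (ys.count y : Int) + 1 := by
          rw [List.count_cons_self]; push_cast; ring
        constructor
        · rintro (⟨rfl, hr⟩ | ⟨hm, hne, hr⟩)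
          · left; exact ⟨rfl, by omega⟩
          · right
            exact ⟨List.mem_cons_of_mem _ hm, hne,
              by rw [List.count_cons_of_ne (Ne.symm hne)]; exact hr⟩
        · rintro (⟨rfl, hr⟩ | ⟨hm, hne, hr⟩)
          · left; exact ⟨rfl, by omega⟩
          · rcases List.mem_cons.1 hm with h1 | h1
            · exact absurd h1 hne
            · right
              exact ⟨h1, hne, by rw [List.count_cons_of_ne (Ne.symm hne)] at hr; exact hr⟩
      · have hlt : cur < y := lt_of_le_of_ne hcy (fun hh => h hh.symm)
        have hnot : cur ∉ y :: ys := by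
          intro hmem
          rcases List.mem_cons.1 hmem with h1 | h1
          · exact absurd h1.symm h
          · have := (List.pairwise_cons.1 hys).1 cur h1
            omega
        have hcount : (y :: ys).count cur = 0 := List.count_eq_zero.2 hnot
        rw [if_neg h, List.mem_cons, ih y 1 hys v r]
        constructor
        · rintro (heq | ⟨rfl, hr⟩ | ⟨hm, hne, hr⟩)
          · have h1 : v = cur := congrArg Prod.fst heq
            have h2 : r = run := congrArg Prod.snd heq
            left; exact ⟨h1, by rw [h2, hcount]; simp⟩
          · right
            refine ⟨List.mem_cons_self .., fun hh => h (hh ▸ rfl), ?_⟩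
            rw [List.count_cons_self]; push_cast; omega
          · right
            have hvc : v ≠ cur := by
              intro hh; subst hh
              exact hnot (List.mem_cons_of_mem _ hm)
            refine ⟨List.mem_cons_of_mem _ hm, hvc, ?_⟩
            rw [List.count_cons_of_ne (Ne.symm hne)]; exact hr
        · rintro (⟨rfl, hr⟩ | ⟨hm, hne, hr⟩)
          · left; rw [hcount] at hr; simp at hr; subst hr; rfl
          · right
            by_cases hvy : v = y
            · subst hvy
              left
              refine ⟨rfl, ?_⟩
              rw [List.count_cons_self] at hr; push_cast at hr ⊢; omega
            · rcases List.mem_cons.1 hm with h1 | h1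
              · exact absurd h1 hvy
              · right
                exact ⟨h1, hvy, by rw [List.count_cons_of_ne (Ne.symm hvy)] at hr; exact hr⟩

theorem le_fst_runsAux (s : List Int) : ∀ cur run, (cur :: s).Pairwise (· ≤ ·) →
    ∀ p ∈ runsAux cur run s, cur ≤ p.1 := by
  induction s with
  | nil => intro cur run _ p hp; simp [runsAux] at hp; simp [hp]
  | cons y ys ih =>
      intro cur run hp p hmem
      have hcy : cur ≤ y := (List.pairwise_cons.1 hp).1 y (List.mem_cons_self ..)
      have hys : (y :: ys).Pairwise (· ≤ ·) := (List.pairwise_cons.1 hp).2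
      simp only [runsAux] at hmem
      by_cases h : y = cur
      · subst h
        rw [if_pos rfl] at hmem
        exact ih y (run + 1) hys p hmem
      · simp [h] at hmem
        rcases hmem with h1 | h1
        · simp [h1]
        · exact le_trans hcy (ih y 1 hys p h1)

theorem nodup_runsAux (s : List Int) : ∀ cur run, (cur :: s).Pairwise (· ≤ ·) →
    (runsAux cur run s).Pairwise (fun a b => a.1 < b.1) := by
  induction s with
  | nil => intro cur run _; simp [runsAux]
  | cons y ys ih =>
      intro cur run hp
      have hcy : cur ≤ y := (List.pairwise_cons.1 hp).1 y (List.mem_cons_self ..)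
      have hys : (y :: ys).Pairwise (· ≤ ·) := (List.pairwise_cons.1 hp).2
      simp only [runsAux]
      by_cases h : y = cur
      · subst h; rw [if_pos rfl]; exact ih y (run + 1) hys
      · have hlt : cur < y := lt_of_le_of_ne hcy (fun hh => h hh.symm)
        simp only [if_neg h]
        refine List.pairwise_cons.2 ⟨?_, ih y 1 hys⟩
        intro p hpmem
        exact lt_of_lt_of_le hlt (le_fst_runsAux ys y 1 hys p hpmem)

-- A's fold equals stepF-fold over the counter items
theorem a_eq_fold (lista : List Int) :
    maior_soma_repetidos lista =
      ((PySem.Set.ofList lista).map (fun k => (k, (lista.count k : Int)))).foldl stepF 0 := by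
  unfold maior_soma_repetidos
  simp only [PySem.Dict.foldl_insert_getD_add_one_eq_counter, PySem.Dict.items_counter]
  rfl

-- B equals stepF-fold over the runs of the sorted list
theorem b_eq_fold (lista : List Int) (x : Int) (xs : List Int)
    (h : PySem.List.sorted lista (fun x => x) false = x :: xs) :
    maior_soma_repetidos_alt lista = (runsAux x 1 xs).foldl stepF 0 := by
  unfold maior_soma_repetidos_alt
  rw [h]
  exact runScan_eq_foldl xs 0 x 1

theorem runs_perm (lista : List Int) (x : Int) (xs : List Int)
    (h : PySem.List.sorted lista (fun x => x) false = x :: xs) :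
    (runsAux x 1 xs).Perm ((PySem.Set.ofList lista).map (fun k => (k, (lista.count k : Int)))) := by
  have hperm : (x :: xs).Perm lista := h ▸ PySem.List.sorted_perm lista (fun x => x) false
  have hsorted : (x :: xs).Pairwise (· ≤ ·) := by
    have := PySem.List.sorted_pairwise lista (fun x => x) (κ := Int)
    rw [h] at this; exact this
  have hnod1 : (runsAux x 1 xs).Nodup :=
    (nodup_runsAux xs x 1 hsorted).imp (fun hlt => by intro hh; rw [hh] at hlt; omega)
  have hnod2 : ((PySem.Set.ofList lista).map (fun k => (k, (lista.count k : Int)))).Nodup := by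
    refine (PySem.Set.nodup_ofList lista).map ?_
    intro a b hab
    exact congrArg Prod.fst hab
  rw [List.perm_ext_iff_of_nodup hnod1 hnod2]
  intro ⟨v, r⟩
  rw [mem_runsAux xs x 1 hsorted v r]
  simp only [List.mem_map, PySem.Set.mem_ofList]
  constructor
  · rintro (⟨rfl, hr⟩ | ⟨hm, hne, hr⟩)
    · refine ⟨v, hperm.subset (List.mem_cons_self ..), ?_⟩
      have hc : (lista.count v : Int) = (xs.count v : Int) + 1 := by
        rw [← hperm.count_eq, List.count_cons_self]; push_cast; ring
      rw [Prod.mk.injEq]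
      exact ⟨rfl, by omega⟩
    · refine ⟨v, hperm.subset (List.mem_cons_of_mem _ hm), ?_⟩
      rw [← hperm.count_eq, List.count_cons_of_ne (Ne.symm hne), hr]
  · rintro ⟨k, hk, heq⟩
    have h1 : k = v := congrArg Prod.fst heq
    subst h1
    have h2 : (lista.count k : Int) = r := congrArg Prod.snd heq
    rw [← hperm.count_eq] at h2
    rcases List.mem_cons.1 (hperm.mem_iff.2 hk) with h1 | h1
    · subst h1
      left
      refine ⟨rfl, ?_⟩
      rw [List.count_cons_self] at h2; push_cast at h2 ⊢; omega
    · by_cases hkx : k = x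
      · subst hkx
        left
        refine ⟨rfl, ?_⟩
        rw [List.count_cons_self] at h2; push_cast at h2 ⊢; omega
      · right
        refine ⟨h1, hkx, ?_⟩
        rw [List.count_cons_of_ne (Ne.symm hkx)] at h2; omega

-- ===== VERDICT (by name: the statement is the Claim_ definition above) =====
theorem maior_soma_repetidos_spec : Claim_equal_maior_soma_repetidos := by
  intro lista _
  unfold Spec_maior_soma_repetidos
  rcases hs : PySem.List.sorted lista (fun x => x) false with _ | ⟨x, xs⟩
  · have hnil : lista = [] := by
      have := PySem.List.sorted_perm lista (fun x => x) false
      rw [hs] at this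
      exact this.symm.eq_nil
    subst hnil
    rfl
  · rw [a_eq_fold, b_eq_fold lista x xs hs]
    exact ((runs_perm lista x xs hs).foldl_eq' (fun a _ b _ z => stepF_comm z a b) 0).symm
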